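-- pv_equiv track=rewrite | github.com/BinarySoftware/wFiIS-Zadania | Python/Lab6/main.py | ileZer
-- ===== SOURCE A (Python) =====
-- def ileZer(s):
--   n = 0
--   for i in s:
--       if i == 1:
--         yield n
--         n = 0
--       else:
--         n += 1
-- ===== SOURCE B (Python) =====
-- def ileZer(s):
--     positions = [i for i, x in enumerate(s) if x == 1]
--     if positions:
--         yield positions[0]
--         for k in range(1, len(positions)):
--             yield positions[k] - positions[k - 1] - 1
-- ===== Notes on version B (the rewrite author's own statement) =====
-- stated objective: alternative
-- what changed: Replaces the running-counter single pass with building the index table of 1-positions via enumerate and then emitting the first position followed by consecutive-position differences minus one.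
import Mathlib
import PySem

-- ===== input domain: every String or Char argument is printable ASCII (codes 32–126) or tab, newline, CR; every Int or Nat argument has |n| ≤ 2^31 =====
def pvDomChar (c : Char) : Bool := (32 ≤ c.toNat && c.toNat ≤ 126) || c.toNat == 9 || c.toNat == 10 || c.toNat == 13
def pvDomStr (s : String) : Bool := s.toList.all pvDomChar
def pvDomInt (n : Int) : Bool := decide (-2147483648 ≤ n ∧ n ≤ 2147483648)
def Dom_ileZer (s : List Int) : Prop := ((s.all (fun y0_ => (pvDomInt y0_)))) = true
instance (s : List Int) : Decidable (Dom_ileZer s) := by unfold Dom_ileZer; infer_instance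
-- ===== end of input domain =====

-- B rebuilds ileZer as a positions-table pass (indices of 1s) followed by gap differences,
-- instead of A's running counter; an alternative decomposition of the same O(n) cost.


-- ===== PORT A =====
-- Port of A: single pass with a running counter n; on each 1 emit n and reset.
def ileZer (s : List Int) : List Int :=
  (s.foldl (fun (st : Int × List Int) i =>
      if i = 1 then (0, st.2 ++ [st.1]) else (st.1 + 1, st.2)) (0, [])).2

-- ===== PORT B =====
-- B helper: the positions table (indices of elements equal to 1), as in Source B's comprehension.
def pvPositions (s : List Int) : List Int :=
  ((List.range s.length).zip s).filterMap
    (fun p => if p.2 = 1 then some ((p.1 : Int)) else none)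

-- Port of B: first position, then consecutive differences minus one.
def ileZer_alt (s : List Int) : List Int :=
  match pvPositions s with
  | [] => []
  | p0 :: rest => p0 :: ((p0 :: rest).zip rest).map (fun q => q.2 - q.1 - 1)

-- ===== PRECONDITION & SPEC =====
def Spec_ileZer (s : List Int) (out : List Int) : Prop := out = ileZer_alt s
instance (s : List Int) (out : List Int) : Decidable (Spec_ileZer s out) := by unfold Spec_ileZer; infer_instance

-- ===== CLAIM (what is proved, stated in full; the proofs are below) =====
def Claim_equal_ileZer : Prop := ∀ (s : List Int), Dom_ileZer s → Spec_ileZer s (ileZer s)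

-- ===== LEMMAS AND PROOFS =====


-- reference recursion: run lengths between 1s, starting counter n
def pvRuns (n : Int) : List Int → List Int
  | [] => []
  | i :: t => if i = 1 then n :: pvRuns 0 t else pvRuns (n + 1) t

lemma ileZer_foldl (s : List Int) : ∀ (n : Int) (acc : List Int),
    (s.foldl (fun (st : Int × List Int) i =>
      if i = 1 then (0, st.2 ++ [st.1]) else (st.1 + 1, st.2)) (n, acc)).2
      = acc ++ pvRuns n s := by
  induction s with
  | nil => intro n acc; simp [pvRuns]
  | cons i t ih =>
    intro n acc
    by_cases h : i = 1 <;> simp [pvRuns, h, ih]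

lemma ileZer_eq_runs (s : List Int) : ileZer s = pvRuns 0 s := by
  simpa using ileZer_foldl s 0 []

-- gaps of a positions list, exactly B's second phase
def pvGaps : List Int → List Int
  | [] => []
  | p0 :: rest => p0 :: ((p0 :: rest).zip rest).map (fun q => q.2 - q.1 - 1)

lemma alt_eq_gaps (s : List Int) : ileZer_alt s = pvGaps (pvPositions s) := by
  unfold ileZer_alt pvGaps
  cases pvPositions s <;> rfl

lemma filterMap_succ (xs : List Nat) : ∀ (t : List Int),
    ((xs.map Nat.succ).zip t).filterMap
        (fun p => if p.2 = 1 then some ((p.1 : Int)) else none)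
      = ((xs.zip t).filterMap
        (fun p => if p.2 = 1 then some ((p.1 : Int)) else none)).map (· + 1) := by
  induction xs with
  | nil => intro t; simp
  | cons x xs ih =>
    intro t
    cases t with
    | nil => simp
    | cons a t =>
      by_cases h : a = 1 <;> simp [h, ih t]

lemma positions_cons (i : Int) (t : List Int) :
    pvPositions (i :: t)
      = if i = 1 then (0 : Int) :: (pvPositions t).map (· + 1)
        else (pvPositions t).map (· + 1) := by
  unfold pvPositions
  rw [show (i :: t).length = t.length + 1 from rfl, List.range_succ_eq_map]
  by_cases h : i = 1 <;> simp [h, filterMap_succ]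

lemma diffs_map_succ (xs : List Int) : ∀ (ys : List Int),
    ((xs.map (· + 1)).zip (ys.map (· + 1))).map (fun q => q.2 - q.1 - 1)
      = (xs.zip ys).map (fun q => q.2 - q.1 - 1) := by
  induction xs with
  | nil => intro ys; simp
  | cons x xs ih =>
    intro ys
    cases ys with
    | nil => simp
    | cons y ys => simp [ih ys]

lemma gaps_map_succ (ps : List Int) :
    pvGaps (ps.map (· + 1))
      = match pvGaps ps with
        | [] => []
        | h :: t => (h + 1) :: t := by
  cases ps with
  | nil => rfl
  | cons p0 rest =>
    simp only [List.map_cons, pvGaps]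
    congr 1
    have := diffs_map_succ (p0 :: rest) rest
    simpa using this

lemma gaps_zero_cons (ps : List Int) :
    pvGaps ((0 : Int) :: ps.map (· + 1)) = 0 :: pvGaps ps := by
  cases ps with
  | nil => rfl
  | cons p0 rest =>
    simp only [List.map_cons, pvGaps, List.zip_cons_cons, List.map_cons]
    have h1 : (p0 + 1 - 0 - 1 : Int) = p0 := by ring
    have h2 := diffs_map_succ (p0 :: rest) rest
    simp only [List.map_cons] at h2
    rw [h1, h2]

-- A = (add n to the head of) gaps ∘ positions
lemma runs_eq_gaps (s : List Int) : ∀ n : Int,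
    pvRuns n s
      = match pvGaps (pvPositions s) with
        | [] => []
        | h :: t => (h + n) :: t := by
  induction s with
  | nil => intro n; simp [pvRuns, pvPositions, pvGaps]
  | cons i t ih =>
    intro n
    rw [positions_cons]
    by_cases h : i = 1
    · simp only [pvRuns, h, if_true, ih 0, gaps_zero_cons]
      cases pvGaps (pvPositions t) <;> simp
    · simp only [pvRuns, h, if_false, ih (n + 1), gaps_map_succ]
      cases pvGaps (pvPositions t) with
      | nil => rfl
      | cons g gs => simp; ring

-- ===== VERDICT (by name: the statement is the Claim_ definition above) =====
theorem ileZer_spec : Claim_equal_ileZer := by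
  intro s _
  unfold Spec_ileZer
  rw [ileZer_eq_runs, alt_eq_gaps, runs_eq_gaps s 0]
  cases pvGaps (pvPositions s) <;> simp
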